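-- pv_equiv track=rewrite | github.com/Dzyans/BigDataExercises | Challenge3/mse.py | int_generator
-- ===== SOURCE A (Python) =====
-- def int_generator(LSH_hashed_string):
--     #print (LSH_hashed_string)
--     value = 0
--     counter = 0
--     for char in LSH_hashed_string:
--         value += ord(char) + counter*4242
--         if counter % 7 == 0:
--             counter = 0
--         counter += 1
--     return value
-- ===== SOURCE B (Python) =====
-- def int_generator(LSH_hashed_string):
--     total = sum(ord(c) for c in LSH_hashed_string)
--     m = max(len(LSH_hashed_string) - 1, 0)
--     r = m % 7
--     mult = (m // 7) * 28 + r * (r + 1) // 2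
--     return total + 4242 * mult
-- ===== Notes on version B (the rewrite author's own statement) =====
-- stated objective: simpler
-- what changed: Replaced the stateful counter loop by a one-expression ordinal sum plus a closed-form arithmetic formula (from the string length alone) for the multiplier total, since the counter follows the fixed pattern 0,1..7,1..7,...
import Mathlib
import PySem

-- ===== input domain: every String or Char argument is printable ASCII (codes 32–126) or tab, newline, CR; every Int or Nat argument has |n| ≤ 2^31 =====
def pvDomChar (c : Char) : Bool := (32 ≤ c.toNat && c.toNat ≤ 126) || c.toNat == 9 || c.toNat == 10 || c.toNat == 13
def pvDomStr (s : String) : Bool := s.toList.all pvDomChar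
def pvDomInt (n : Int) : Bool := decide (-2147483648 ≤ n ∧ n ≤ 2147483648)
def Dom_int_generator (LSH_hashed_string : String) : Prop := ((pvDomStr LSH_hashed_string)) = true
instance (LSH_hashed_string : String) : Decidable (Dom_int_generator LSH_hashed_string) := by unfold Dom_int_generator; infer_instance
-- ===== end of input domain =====

-- B replaces A's stateful counter loop by an ordinal sum plus a closed-form length formula (simpler).

-- ===== PORT A =====
-- loop over the characters carrying (value, counter), exactly as A's for-loop
def aLoop : List Char → Int × Int → Int × Int
  | [], st => st
  | ch :: rest, (value, counter) =>
      let value := value + (ch.toNat : Int) + counter * 4242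
      let counter := if PySem.Int.mod counter 7 == 0 then 0 else counter
      aLoop rest (value, counter + 1)

def int_generator (LSH_hashed_string : String) : Int :=
  (aLoop LSH_hashed_string.toList (0, 0)).1

-- ===== PORT B =====
def int_generator_alt (LSH_hashed_string : String) : Int :=
  let total : Int := (LSH_hashed_string.toList.map (fun c => (c.toNat : Int))).sum
  let m : Int := max ((LSH_hashed_string.toList.length : Int) - 1) 0
  let r : Int := PySem.Int.mod m 7
  let mult : Int := PySem.Int.floordiv m 7 * 28 + PySem.Int.floordiv (r * (r + 1)) 2
  total + 4242 * mult

-- ===== PRECONDITION & SPEC =====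
def Spec_int_generator (LSH_hashed_string : String) (out : Int) : Prop := out = int_generator_alt LSH_hashed_string
instance (LSH_hashed_string : String) (out : Int) : Decidable (Spec_int_generator LSH_hashed_string out) := by unfold Spec_int_generator; infer_instance

-- ===== CLAIM (what is proved, stated in full; the proofs are below) =====
def Claim_equal_int_generator : Prop := ∀ (LSH_hashed_string : String), Dom_int_generator LSH_hashed_string → Spec_int_generator LSH_hashed_string (int_generator LSH_hashed_string)

-- ===== LEMMAS AND PROOFS =====

-- the counter value A's loop holds after k iterations
def cnt (k : Nat) : Nat := if k = 0 then 0 else (k - 1) % 7 + 1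

-- the closed-form multiplier total for a string of length n (Nat version of B's formula)
def natMult (n : Nat) : Nat := ((n - 1) / 7) * 28 + ((n - 1) % 7) * ((n - 1) % 7 + 1) / 2

theorem natMult_succ (n : Nat) : natMult (n + 1) = natMult n + cnt n := by
  unfold natMult cnt
  rcases n with _ | k
  · decide
  · simp only [Nat.succ_sub_one, Nat.add_sub_cancel, if_neg (Nat.succ_ne_zero k)]
    have h : k % 7 = 0 ∨ k % 7 = 1 ∨ k % 7 = 2 ∨ k % 7 = 3 ∨ k % 7 = 4 ∨ k % 7 = 5 ∨ k % 7 = 6 := by omega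
    rcases h with h | h | h | h | h | h | h
    · rw [h, show (k + 1) % 7 = 1 by omega]; omega
    · rw [h, show (k + 1) % 7 = 2 by omega]; omega
    · rw [h, show (k + 1) % 7 = 3 by omega]; omega
    · rw [h, show (k + 1) % 7 = 4 by omega]; omega
    · rw [h, show (k + 1) % 7 = 5 by omega]; omega
    · rw [h, show (k + 1) % 7 = 6 by omega]; omega
    · rw [h, show (k + 1) % 7 = 0 by omega]; omega

theorem cnt_step (k : Nat) :
    (if PySem.Int.mod (cnt k : Int) 7 == 0 then 0 else (cnt k : Int)) + 1 = (cnt (k + 1) : Int) := by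
  have hm : PySem.Int.mod (cnt k : Int) 7 = (((cnt k) % 7 : Nat) : Int) := by
    exact_mod_cast PySem.Int.mod_natCast (cnt k) 7
  rw [hm]
  unfold cnt
  rcases k with _ | j
  · decide
  · simp only [if_neg (Nat.succ_ne_zero j), Nat.succ_sub_one, Nat.add_sub_cancel]
    have h : j % 7 = 0 ∨ j % 7 = 1 ∨ j % 7 = 2 ∨ j % 7 = 3 ∨ j % 7 = 4 ∨ j % 7 = 5 ∨ j % 7 = 6 := by omega
    rcases h with h | h | h | h | h | h | h <;>
      simp [h, Nat.add_mod, beq_iff_eq] <;> omega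

def sumOrd (l : List Char) : Int := (l.map (fun c => (c.toNat : Int))).sum

theorem aLoop_key (l : List Char) : ∀ (v : Int) (k : Nat),
    (aLoop l (v, (cnt k : Int))).1
      = v + sumOrd l + 4242 * ((natMult (k + l.length) : Int) - (natMult k : Int)) := by
  induction l with
  | nil => intro v k; simp [aLoop, sumOrd]
  | cons ch rest ih =>
    intro v k
    have hstep := cnt_step k
    simp only [aLoop]
    rw [hstep]
    rw [ih (v + (ch.toNat : Int) + (cnt k : Int) * 4242) (k + 1)]
    have hn : natMult (k + 1) = natMult k + cnt k := natMult_succ k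
    have hlen : k + 1 + rest.length = k + (rest.length + 1) := by omega
    rw [hlen]
    simp only [sumOrd, List.map_cons, List.sum_cons, List.length_cons]
    push_cast [hn]
    ring

theorem alt_eq (s : String) :
    int_generator_alt s = sumOrd s.toList + 4242 * (natMult s.toList.length : Int) := by
  unfold int_generator_alt sumOrd natMult
  dsimp only
  generalize s.toList = l
  have hm : max ((l.length : Int) - 1) 0 = ((l.length - 1 : Nat) : Int) := by
    rcases l with _ | ⟨c, t⟩ <;> simp <;> omega
  rw [hm]
  have h1 : PySem.Int.floordiv ((l.length - 1 : Nat) : Int) 7 = (((l.length - 1) / 7 : Nat) : Int) := by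
    exact_mod_cast PySem.Int.floordiv_natCast (l.length - 1) 7
  have h2 : PySem.Int.mod ((l.length - 1 : Nat) : Int) 7 = (((l.length - 1) % 7 : Nat) : Int) := by
    exact_mod_cast PySem.Int.mod_natCast (l.length - 1) 7
  rw [h1, h2]
  have h3 : (((l.length - 1) % 7 : Nat) : Int) * ((((l.length - 1) % 7 : Nat) : Int) + 1)
      = (((l.length - 1) % 7 * ((l.length - 1) % 7 + 1) : Nat) : Int) := by push_cast; ring
  rw [h3]
  have h4 : PySem.Int.floordiv (((l.length - 1) % 7 * ((l.length - 1) % 7 + 1) : Nat) : Int) 2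
      = ((((l.length - 1) % 7 * ((l.length - 1) % 7 + 1)) / 2 : Nat) : Int) := by
    exact_mod_cast PySem.Int.floordiv_natCast ((l.length - 1) % 7 * ((l.length - 1) % 7 + 1)) 2
  rw [h4]
  push_cast
  ring

-- ===== VERDICT (by name: the statement is the Claim_ definition above) =====
theorem int_generator_spec : Claim_equal_int_generator := by
  intro s _
  unfold Spec_int_generator
  rw [alt_eq]
  show (aLoop s.toList (0, 0)).1 = _
  have h0 : ((0 : Int) = (cnt 0 : Int)) := by decide
  rw [show ((0 : Int), (0 : Int)) = ((0 : Int), (cnt 0 : Int)) from by rw [← h0]]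
  rw [aLoop_key s.toList 0 0]
  simp [natMult]
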